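-- pv_equiv track=rewrite | github.com/johnnichev/harry-potter-q-a-rag-system | backend/app/services/generator.py | assemble_contexts
-- ===== SOURCE A (Python) =====
-- def assemble_contexts(contexts: list[str], budget: int) -> str:
--     """Join contexts into a single section within the provided char budget.
--
--     Truncates the last context if necessary to fit the budget, and returns
--     the final concatenated string.
--     """
--     segments: list[str] = []
--     usedChars = 0
--     for context in contexts:
--         contextBlock = f"Context:\n{context}"
--         nextSize = usedChars + len(contextBlock)
--         if nextSize > budget:
--             remaining = budget - usedChars
--             if remaining > 0:
--                 segments.append(contextBlock[:remaining])
--                 usedChars += remaining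
--             break
--         segments.append(contextBlock)
--         usedChars += len(contextBlock)
--     return "\n\n".join(segments)
-- ===== SOURCE B (Python) =====
-- def assemble_contexts(contexts: list[str], budget: int) -> str:
--     """Join contexts into a single section within the provided char budget.
--
--     Treats the budget as a single global slice over the flattened block text:
--     flatten all blocks into one pool, cut the pool at the budget, then re-cut
--     the pool back into blocks by consuming each block's length in turn.
--     """
--     pool = "".join("Context:\n" + c for c in contexts)
--     pool = pool[:budget] if budget > 0 else ""
--     segments: list[str] = []
--     for c in contexts:
--         L = 9 + len(c)
--         chunk, pool = pool[:L], pool[L:]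
--         if not chunk:
--             break
--         segments.append(chunk)
--         if len(chunk) < L:
--             break
--     return "\n\n".join(segments)
-- ===== Notes on version B (the rewrite author's own statement) =====
-- stated objective: alternative
-- what changed: A packs blocks one by one inside a single loop, charging each block against the budget and truncating at overflow; B flattens all blocks into one character pool, applies the budget as one global slice of that pool, and then re-cuts the truncated pool back into segments by consuming each block's length.
import Mathlib
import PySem

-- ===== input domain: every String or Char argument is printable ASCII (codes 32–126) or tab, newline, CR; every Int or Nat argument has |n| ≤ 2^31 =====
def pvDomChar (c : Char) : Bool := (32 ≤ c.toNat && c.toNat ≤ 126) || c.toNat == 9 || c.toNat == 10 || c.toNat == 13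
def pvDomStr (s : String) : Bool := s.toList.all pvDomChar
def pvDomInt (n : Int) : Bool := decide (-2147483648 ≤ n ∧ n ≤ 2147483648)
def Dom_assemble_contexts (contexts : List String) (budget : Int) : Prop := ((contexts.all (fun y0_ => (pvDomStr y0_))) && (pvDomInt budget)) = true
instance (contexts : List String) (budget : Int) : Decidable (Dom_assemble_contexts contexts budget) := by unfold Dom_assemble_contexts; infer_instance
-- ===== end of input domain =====

-- B applies the budget as ONE global slice of the flattened block text and re-cuts that
-- pool into segments by block lengths, instead of A's per-block charge-and-truncate loop;
-- same cost, a different algorithm shape. Both are total.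

-- ===== PORT A =====
-- A's for-loop: carries the accumulated segments and usedChars, breaks on overflow.
def assembleLoopA (budget : Int) (contexts : List String) (segments : List String)
    (used : Int) : List String :=
  match contexts with
  | [] => segments
  | c :: rest =>
    let block := "Context:\n" ++ c
    let nextSize := used + (PySem.Str.len block : Int)
    if nextSize > budget then
      let remaining := budget - used
      if remaining > 0 then segments ++ [PySem.Str.slice block none (some remaining)]
      else segments
    else assembleLoopA budget rest (segments ++ [block]) (used + (PySem.Str.len block : Int))

def assemble_contexts (contexts : List String) (budget : Int) : String :=
  PySem.Str.join "\n\n" (assembleLoopA budget contexts [] 0)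

-- ===== PORT B =====
-- Source B's re-cut loop; the pool string is carried as its List Char (PySem's string model).
-- chunk, pool = pool[:L], pool[L:]  — L ≥ 0, so the slices are exactly take/drop.
-- (chunk = pool.take L and the rest pool pool' = pool.drop L are inlined)
def recutLoopB : List Char → List String → List String
  | _, [] => []
  | pool, c :: rest =>
    if (pool.take (9 + c.toList.length)).isEmpty then []
    else if (pool.take (9 + c.toList.length)).length < 9 + c.toList.length then
      [String.ofList (pool.take (9 + c.toList.length))]
    else String.ofList (pool.take (9 + c.toList.length)) ::
      recutLoopB (pool.drop (9 + c.toList.length)) rest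

def assemble_contexts_alt (contexts : List String) (budget : Int) : String :=
  let pool := (contexts.map (fun c => ("Context:\n" ++ c).toList)).flatten
  let pool := if budget > 0 then pool.take budget.toNat else []
  PySem.Str.join "\n\n" (recutLoopB pool contexts)

-- ===== PRECONDITION & SPEC =====
def Spec_assemble_contexts (contexts : List String) (budget : Int) (out : String) : Prop := out = assemble_contexts_alt contexts budget
instance (contexts : List String) (budget : Int) (out : String) : Decidable (Spec_assemble_contexts contexts budget out) := by unfold Spec_assemble_contexts; infer_instance

-- ===== CLAIM (what is proved, stated in full; the proofs are below) =====
def Claim_equal_assemble_contexts : Prop := ∀ (contexts : List String) (budget : Int), Dom_assemble_contexts contexts budget → Spec_assemble_contexts contexts budget (assemble_contexts contexts budget)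

-- ===== LEMMAS AND PROOFS =====

-- canonical segment list A produces (the loop without its accumulator)
def segsF (budget : Int) (used : Int) : List String → List String
  | [] => []
  | c :: rest =>
    let block := "Context:\n" ++ c
    if used + (PySem.Str.len block : Int) > budget then
      if budget - used > 0 then [PySem.Str.slice block none (some (budget - used))] else []
    else block :: segsF budget (used + (PySem.Str.len block : Int)) rest

theorem loopA_eq (budget : Int) (contexts : List String) :
    ∀ (segments : List String) (used : Int),
      assembleLoopA budget contexts segments used = segments ++ segsF budget used contexts := by
  induction contexts with
  | nil => intro segments used; simp [assembleLoopA, segsF]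
  | cons c rest ih =>
    intro segments used
    simp only [assembleLoopA, segsF]
    split_ifs with h1 h2 <;> simp [ih]

theorem len_block (c : String) :
    (PySem.Str.len ("Context:\n" ++ c) : Int) = ((9 + c.toList.length : Nat) : Int) := by
  simp [PySem.Str.len_eq]
  omega

theorem recut_eq_segsF (budget : Int) (contexts : List String) :
    ∀ (used : Int),
      recutLoopB (List.take (budget - used).toNat
          ((contexts.map (fun c => ("Context:\n" ++ c).toList)).flatten)) contexts
        = segsF budget used contexts := by
  induction contexts with
  | nil => intro used; simp [recutLoopB, segsF]
  | cons c rest ih =>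
    intro used
    have hlen : ("Context:\n" ++ c).toList.length = 9 + c.toList.length := by simp; omega
    have hlenI : (PySem.Str.len ("Context:\n" ++ c) : Int) = ((9 + c.toList.length : Nat) : Int) :=
      len_block c
    simp only [List.map_cons, List.flatten_cons, recutLoopB, segsF, List.take_take]
    by_cases hov : used + (PySem.Str.len ("Context:\n" ++ c) : Int) > budget
    · rw [if_pos hov]
      have hov' : budget - used < ((9 + c.toList.length : Nat) : Int) := by
        rw [hlenI] at hov; omega
      by_cases hr : budget - used > 0
      · rw [if_pos hr]
        have hm0 : 0 < (budget - used).toNat := by omega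
        have hmL : (budget - used).toNat < 9 + c.toList.length := by omega
        have hmin : min (9 + c.toList.length) (budget - used).toNat = (budget - used).toNat :=
          Nat.min_eq_right (by omega)
        rw [hmin, List.take_append_of_le_length (by omega : (budget - used).toNat ≤ ("Context:\n" ++ c).toList.length)]
        have hclen : ((("Context:\n" ++ c).toList.take (budget - used).toNat)).length
            = (budget - used).toNat := by
          rw [List.length_take, hlen]; exact Nat.min_eq_left (by omega)
        rw [if_neg (by simp [List.isEmpty_iff, ← List.length_eq_zero_iff]; omega)]
        rw [if_pos (by rw [hclen]; exact hmL)]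
        have hsl : PySem.Str.slice ("Context:\n" ++ c) none (some (budget - used))
            = String.ofList (("Context:\n" ++ c).toList.take (budget - used).toNat) := by
          simp [PySem.Str.slice, PySem.List.slice_to _ (by omega : (0:Int) ≤ budget - used)]
        rw [hsl]
      · rw [if_neg hr]
        have hm0 : (budget - used).toNat = 0 := by omega
        simp [hm0]
    · rw [if_neg hov]
      have hLle : ((9 + c.toList.length : Nat) : Int) ≤ budget - used := by
        rw [hlenI] at hov; omega
      have hmin : min (9 + c.toList.length) (budget - used).toNat = 9 + c.toList.length :=
        Nat.min_eq_left (by omega)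
      rw [hmin, List.take_append_of_le_length (by omega : 9 + c.toList.length ≤ ("Context:\n" ++ c).toList.length),
        List.take_of_length_le (by omega : ("Context:\n" ++ c).toList.length ≤ 9 + c.toList.length)]
      have hne : ¬ ((("Context:\n" ++ c).toList).isEmpty = true) := by simp
      have hnlt : ¬ ((("Context:\n" ++ c).toList).length < 9 + c.toList.length) := by
        rw [hlen]; exact lt_irrefl _
      rw [if_neg hne, if_neg hnlt]
      rw [List.drop_take, List.drop_append_of_le_length (le_of_eq hlen.symm)]
      have hd : ("Context:\n" ++ c).toList.drop (9 + c.toList.length) = [] := by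
        simp [List.drop_eq_nil_iff]; omega
      rw [hd, List.nil_append]
      have harg : (budget - used).toNat - (9 + c.toList.length)
          = (budget - (used + (PySem.Str.len ("Context:\n" ++ c) : Int))).toNat := by
        rw [hlenI]; omega
      rw [harg, ih]
      congr 1
      exact String.ofList_toList

-- ===== VERDICT (by name: the statement is the Claim_ definition above) =====
theorem assemble_contexts_spec : Claim_equal_assemble_contexts := by
  intro contexts budget _
  unfold Spec_assemble_contexts assemble_contexts assemble_contexts_alt
  rw [loopA_eq]
  simp only [List.nil_append]
  congr 1
  have h := recut_eq_segsF budget contexts 0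
  rw [← h]
  congr 1
  by_cases hb : budget > 0
  · simp [hb]
  · rw [if_neg hb]
    have hz : (budget - 0).toNat = 0 := by omega
    rw [hz, List.take_zero]
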